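-- pv_equiv track=rewrite | github.com/FatlumMehmeti/Python_practice | Projects/hard_questions.py | sum_duplicates
-- ===== SOURCE A (Python) =====
-- def sum_duplicates(nums):
--     freq = {}
--     for n in nums:
--         freq[n] = freq.get(n,0) + 1
--     total = 0
--     for k,v in freq.items():
--         if v > 1:
--             total += k * v
--     return total
-- ===== SOURCE B (Python) =====
-- def sum_duplicates(nums):
--     seen = set()
--     dups = set()
--     for x in nums:
--         if x in seen:
--             dups.add(x)
--         else:
--             seen.add(x)
--     return sum(x for x in nums if x in dups)
-- ===== Notes on version B (the rewrite author's own statement) =====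
-- stated objective: alternative
-- what changed: Replaces the frequency dict and the weighted sum over distinct keys (k*v for v>1) by a one-pass seen/dups two-set duplicate detector followed by summing the duplicate occurrences directly from the input list.
import Mathlib
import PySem

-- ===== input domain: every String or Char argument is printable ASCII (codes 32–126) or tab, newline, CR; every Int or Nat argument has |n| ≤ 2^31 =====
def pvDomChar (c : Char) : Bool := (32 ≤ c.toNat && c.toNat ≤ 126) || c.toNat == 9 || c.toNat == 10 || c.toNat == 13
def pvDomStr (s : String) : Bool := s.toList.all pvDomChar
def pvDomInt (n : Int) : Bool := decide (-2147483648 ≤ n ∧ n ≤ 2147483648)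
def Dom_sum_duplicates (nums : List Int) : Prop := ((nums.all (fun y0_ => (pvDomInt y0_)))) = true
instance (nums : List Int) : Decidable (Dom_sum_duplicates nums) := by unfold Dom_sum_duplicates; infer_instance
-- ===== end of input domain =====

-- B replaces A's frequency dict and its weighted sum over distinct keys by a one-pass
-- seen/dups two-set duplicate detector plus a direct sum of duplicate occurrences
-- (objective: alternative; same cost).

-- ===== PORT A =====
def sum_duplicates (nums : List Int) : Int :=
  let freq := nums.foldl (fun d n => d.insert n (d.getD n 0 + 1)) (PySem.Dict.empty : PySem.Dict Int Int)
  freq.items.foldl (fun total kv => if kv.2 > 1 then total + kv.1 * kv.2 else total) 0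

-- ===== PORT B =====
-- one step of B's loop over the state (seen, dups): 'if x in seen: dups.add(x) else: seen.add(x)'
def bStep (p : PySem.Set Int × PySem.Set Int) (x : Int) : PySem.Set Int × PySem.Set Int :=
  if PySem.Set.contains p.1 x then (p.1, PySem.Set.add p.2 x) else (PySem.Set.add p.1 x, p.2)

def sum_duplicates_alt (nums : List Int) : Int :=
  let sd := nums.foldl bStep (PySem.Set.empty, PySem.Set.empty)
  (nums.filter (fun x => PySem.Set.contains sd.2 x)).sum

-- ===== PRECONDITION & SPEC =====
def Spec_sum_duplicates (nums : List Int) (out : Int) : Prop := out = sum_duplicates_alt nums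
instance (nums : List Int) (out : Int) : Decidable (Spec_sum_duplicates nums out) := by unfold Spec_sum_duplicates; infer_instance

-- ===== CLAIM (what is proved, stated in full; the proofs are below) =====
def Claim_equal_sum_duplicates : Prop := ∀ (nums : List Int), Dom_sum_duplicates nums → Spec_sum_duplicates nums (sum_duplicates nums)

-- ===== LEMMAS AND PROOFS =====

-- A's items loop is a sum over the dict items
theorem a_items_foldl (l : List (Int × Int)) (init : Int) :
    l.foldl (fun total kv => if kv.2 > 1 then total + kv.1 * kv.2 else total) init
      = init + (l.map (fun kv : Int × Int => if kv.2 > 1 then kv.1 * kv.2 else 0)).sum := by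
  induction l generalizing init with
  | nil => simp
  | cons kv t ih =>
    simp only [List.foldl_cons, List.map_cons, List.sum_cons, ih]
    split_ifs <;> ring

-- membership in B's dups set, relative to the loop state (s, d)
theorem dups_mem (l : List Int) (s d : PySem.Set Int) (y : Int) :
    (y ∈ (l.foldl bStep (s, d)).2)
    ↔ (y ∈ d ∨ (y ∈ s ∧ 1 ≤ l.count y) ∨ 2 ≤ l.count y) := by
  induction l generalizing s d with
  | nil => simp
  | cons x t ih =>
    simp only [List.foldl_cons]
    by_cases hx : x ∈ s
    · rw [show bStep (s, d) x = (s, PySem.Set.add d x) by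
        unfold bStep; rw [if_pos ((PySem.Set.contains_iff s x).mpr hx)], ih]
      by_cases hyx : y = x
      · subst hyx
        rw [List.count_cons_self]
        simp only [PySem.Set.mem_add]
        constructor
        · rintro ((h | _) | ⟨hs, h1⟩ | h2)
          · exact Or.inl h
          · exact Or.inr (Or.inl ⟨hx, by omega⟩)
          · exact Or.inr (Or.inl ⟨hs, by omega⟩)
          · exact Or.inr (Or.inr (by omega))
        · rintro (h | ⟨_, _⟩ | h2)
          · exact Or.inl (Or.inl h)
          · exact Or.inl (Or.inr trivial)
          · exact Or.inl (Or.inr trivial)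
      · rw [List.count_cons_of_ne (fun h => hyx h.symm)]
        simp only [PySem.Set.mem_add]
        tauto
    · rw [show bStep (s, d) x = (PySem.Set.add s x, d) by
        unfold bStep; rw [if_neg (fun hc => hx ((PySem.Set.contains_iff s x).mp hc))], ih]
      by_cases hyx : y = x
      · subst hyx
        rw [List.count_cons_self]
        simp only [PySem.Set.mem_add]
        constructor
        · rintro (h | ⟨_, h1⟩ | h2)
          · exact Or.inl h
          · exact Or.inr (Or.inr (by omega))
          · exact Or.inr (Or.inr (by omega))
        · rintro (h | ⟨hs, _⟩ | h2)
          · exact Or.inl h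
          · exact absurd hs hx
          · by_cases h1 : 2 ≤ t.count y
            · exact Or.inr (Or.inr h1)
            · exact Or.inr (Or.inl ⟨Or.inr trivial, by omega⟩)
      · rw [List.count_cons_of_ne (fun h => hyx h.symm)]
        simp only [PySem.Set.mem_add]
        tauto

-- B computes the sum of the occurrences of values occurring at least twice
theorem b_eq_filter_count (nums : List Int) :
    sum_duplicates_alt nums = (nums.filter (fun x => 2 ≤ nums.count x)).sum := by
  have hrfl : sum_duplicates_alt nums
      = (nums.filter (fun x => PySem.Set.contains (nums.foldl bStep (PySem.Set.empty, PySem.Set.empty)).2 x)).sum := rfl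
  rw [hrfl]
  congr 1
  apply List.filter_congr
  intro x _
  rw [Bool.eq_iff_iff, PySem.Set.contains_iff, dups_mem]
  simp [PySem.Set.empty]

-- A computes the weighted sum over the distinct values
theorem a_eq_dedup_sum (nums : List Int) :
    sum_duplicates nums
      = ((PySem.Set.ofList nums).map
          (fun k => if (nums.count k : Int) > 1 then k * (nums.count k : Int) else 0)).sum := by
  unfold sum_duplicates
  rw [PySem.Dict.foldl_insert_getD_add_one_eq_counter, a_items_foldl, PySem.Dict.items_counter]
  simp [List.map_map, Function.comp_def]

-- ===== VERDICT (by name: the statement is the Claim_ definition above) =====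
theorem sum_duplicates_spec : Claim_equal_sum_duplicates := by
  intro nums _
  unfold Spec_sum_duplicates
  rw [a_eq_dedup_sum, b_eq_filter_count]
  rw [Finset.sum_list_count (nums.filter (fun x => decide (2 ≤ nums.count x)))]
  rw [← List.sum_toFinset _ (PySem.Set.nodup_ofList nums)]
  have hto : (PySem.Set.ofList nums).toFinset = nums.toFinset := by
    ext a; simp [PySem.Set.mem_ofList]
  rw [hto, List.toFinset_filter, Finset.sum_filter]
  apply Finset.sum_congr rfl
  intro a _
  by_cases h2 : 2 ≤ nums.count a
  · have hcf : (nums.filter (fun x => decide (2 ≤ nums.count x))).count a = nums.count a := by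
      rw [List.count_filter]
      simp [h2]
    simp only [h2, decide_true, if_pos, hcf]
    rw [if_pos (by exact_mod_cast by omega : (nums.count a : Int) > 1)]
    push_cast [nsmul_eq_mul]
    ring
  · simp only [h2, decide_false]
    rw [if_neg (by exact_mod_cast by omega : ¬ (nums.count a : Int) > 1)]
    simp
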